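-- pv_equiv track=rewrite | github.com/milanradisavljevic/retail-investor | scripts/etl/fetch_etf_metadata.py | detect_management_style
-- ===== SOURCE A (Python) =====
-- PASSIVE_PROVIDERS = ["vanguard", "ishares", "spdr", "state street", "schwab", "invesco (qqq)", "jpmorgan"]
--
-- ACTIVE_PROVIDERS = ["ark", "wood", "active"]
--
-- def detect_management_style(name: str, fund_family: str) -> str:
--     """Detect passive vs active management style using heuristics."""
--     name_lower = (name or "").lower()
--     family_lower = (fund_family or "").lower()
--
--     # Check for active providers first
--     for keyword in ACTIVE_PROVIDERS:
--         if keyword in name_lower or keyword in family_lower: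
--             return "active"
--
--     # Check for passive providers
--     for provider in PASSIVE_PROVIDERS:
--         if provider in family_lower or provider in name_lower:
--             return "passive"
--
--     # Default to passive for index-tracking ETFs
--     index_keywords = ["index", "s&p", "nasdaq", "russell", "msci", "ftse"]
--     for kw in index_keywords:
--         if kw in name_lower:
--             return "passive"
--
--     return "passive"  # Default assumption
-- ===== SOURCE B (Python) =====
-- ACTIVE_PROVIDERS = ["ark", "wood", "active"]
--
-- def detect_management_style(name: str, fund_family: str) -> str:
--     """Detect passive vs active management style using heuristics."""
--     name_lower = (name or "").lower()
--     family_lower = (fund_family or "").lower()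
--     if ("ark" in name_lower or "ark" in family_lower
--             or "wood" in name_lower or "wood" in family_lower
--             or "active" in name_lower or "active" in family_lower):
--         return "active"
--     return "passive"
-- ===== Notes on version B (the rewrite author's own statement) =====
-- stated objective: simpler
-- what changed: All passive-provider and index-keyword branches plus the fallthrough return 'passive', so B drops them entirely and replaces A's three sequential keyword scans (16 keywords) with a single unrolled boolean test over the three active keywords.
import Mathlib
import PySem

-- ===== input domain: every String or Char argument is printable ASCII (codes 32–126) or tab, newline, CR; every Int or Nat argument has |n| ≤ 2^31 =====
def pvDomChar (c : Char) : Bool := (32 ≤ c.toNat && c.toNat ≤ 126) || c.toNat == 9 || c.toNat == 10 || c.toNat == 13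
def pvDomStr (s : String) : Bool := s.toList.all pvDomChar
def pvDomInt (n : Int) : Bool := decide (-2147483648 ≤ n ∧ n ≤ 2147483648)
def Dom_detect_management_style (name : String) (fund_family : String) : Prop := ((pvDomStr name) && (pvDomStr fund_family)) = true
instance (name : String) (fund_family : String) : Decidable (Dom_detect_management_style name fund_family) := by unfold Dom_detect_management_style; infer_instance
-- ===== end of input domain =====

-- B drops the dead passive/index branches of A, replacing three keyword scans with one boolean test (objective: simpler).


-- ===== PORT A =====
def pvPassiveProviders : List String := ["vanguard", "ishares", "spdr", "state street", "schwab", "invesco (qqq)", "jpmorgan"]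
def pvActiveProviders : List String := ["ark", "wood", "active"]
def pvIndexKeywords : List String := ["index", "s&p", "nasdaq", "russell", "msci", "ftse"]

def detect_management_style (name : String) (fund_family : String) : String :=
  let name_lower := PySem.Str.lower name
  let family_lower := PySem.Str.lower fund_family
  -- for keyword in ACTIVE_PROVIDERS: if … return "active"  (first-hit loop = any)
  if pvActiveProviders.any (fun keyword => PySem.Str.isIn keyword name_lower || PySem.Str.isIn keyword family_lower) then "active"
  -- for provider in PASSIVE_PROVIDERS: …
  else if pvPassiveProviders.any (fun provider => PySem.Str.isIn provider family_lower || PySem.Str.isIn provider name_lower) then "passive"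
  -- for kw in index_keywords: …
  else if pvIndexKeywords.any (fun kw => PySem.Str.isIn kw name_lower) then "passive"
  else "passive"

-- ===== PORT B =====
-- B: only the active keywords can change the answer; one unrolled boolean test, no keyword lists.
def detect_management_style_alt (name : String) (fund_family : String) : String :=
  let name_lower := PySem.Str.lower name
  let family_lower := PySem.Str.lower fund_family
  if PySem.Str.isIn "ark" name_lower || PySem.Str.isIn "ark" family_lower
      || PySem.Str.isIn "wood" name_lower || PySem.Str.isIn "wood" family_lower
      || PySem.Str.isIn "active" name_lower || PySem.Str.isIn "active" family_lower
  then "active" else "passive"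

-- ===== PRECONDITION & SPEC =====
def Spec_detect_management_style (name : String) (fund_family : String) (out : String) : Prop := out = detect_management_style_alt name fund_family
instance (name : String) (fund_family : String) (out : String) : Decidable (Spec_detect_management_style name fund_family out) := by unfold Spec_detect_management_style; infer_instance

-- ===== CLAIM (what is proved, stated in full; the proofs are below) =====
def Claim_equal_detect_management_style : Prop := ∀ (name : String) (fund_family : String), Dom_detect_management_style name fund_family → Spec_detect_management_style name fund_family (detect_management_style name fund_family)

-- ===== LEMMAS AND PROOFS =====

-- ===== VERDICT (by name: the statement is the Claim_ definition above) =====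
theorem detect_management_style_spec : Claim_equal_detect_management_style := by
  intro name fund_family _
  unfold Spec_detect_management_style detect_management_style detect_management_style_alt
    pvActiveProviders pvPassiveProviders pvIndexKeywords
  simp only [List.any_cons, List.any_nil, Bool.or_false, Bool.or_assoc]
  split_ifs <;> rfl
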